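-- pv_equiv track=rewrite | github.com/Mahita495/nqt_problems | num_diff.py | num_diff
-- ===== SOURCE A (Python) =====
-- def num_diff(n):
--     nums=[]
--     while n>0:
--         digit=n%10
--         nums.append(digit)
--         n=n//10
--     n1=sorted(nums)
--     n2=sorted(nums, reverse=True)
--     n1=[str(i) for i in n1]
--     n2=[str(i) for i in n2]
--     s1=''.join(n1)
--     s2=''.join(n2)
--     return abs(int(s1)-int(s2))
-- ===== SOURCE B (Python) =====
-- def num_diff(n):
--     counts = [0] * 10
--     while n > 0:
--         counts[n % 10] += 1
--         n //= 10
--     asc = ''.join(str(d) * counts[d] for d in range(10))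
--     desc = ''.join(str(d) * counts[d] for d in range(9, -1, -1))
--     return abs(int(asc) - int(desc))
-- ===== Notes on version B (the rewrite author's own statement) =====
-- stated objective: alternative
-- what changed: Replaces the two sorted() calls and per-digit list append with a per-digit frequency table (counting sort) filled while peeling digits, from which the ascending and descending digit strings are rebuilt by two reconstruction passes.
import Mathlib
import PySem

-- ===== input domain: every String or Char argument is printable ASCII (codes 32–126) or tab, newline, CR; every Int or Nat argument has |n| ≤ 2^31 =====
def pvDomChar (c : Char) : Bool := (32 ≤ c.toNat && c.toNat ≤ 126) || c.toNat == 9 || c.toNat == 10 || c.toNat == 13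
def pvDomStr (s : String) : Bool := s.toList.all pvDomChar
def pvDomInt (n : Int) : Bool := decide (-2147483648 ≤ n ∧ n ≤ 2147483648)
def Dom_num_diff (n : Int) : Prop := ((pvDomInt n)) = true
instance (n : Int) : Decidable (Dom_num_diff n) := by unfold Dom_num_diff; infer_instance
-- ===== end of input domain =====

-- B replaces the two sorted() calls by a digit-frequency table (counting sort): the peel loop
-- increments counts[digit] and the ascending/descending digit strings are rebuilt from that
-- table; objective: alternative (same behaviour, no speed claim).

-- ===== PORT A =====
-- while n>0: nums.append(n%10); n//=10
def numDiffLoopA (n : Int) (nums : List Int) : List Int :=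
  if _h : n > 0 then
    numDiffLoopA (PySem.Int.floordiv n 10) (nums ++ [PySem.Int.mod n 10])
  else nums
termination_by n.toNat
decreasing_by
  rw [PySem.Int.floordiv_eq_ediv_of_pos (by norm_num : (0:Int) < 10)]
  omega

-- int(s) raises ValueError on the empty string (reached only for non-positive n, excluded by Pre_);
-- the port takes the Option's default there.
def num_diff (n : Int) : Int :=
  let nums := numDiffLoopA n []
  let n1 := PySem.List.sorted nums (fun i => i) false
  let n2 := PySem.List.sorted nums (fun i => i) true
  let s1 := PySem.Str.join "" (n1.map (fun i => PySem.Int.toStr i))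
  let s2 := PySem.Str.join "" (n2.map (fun i => PySem.Int.toStr i))
  |(PySem.Int.ofStr? s1).getD 0 - (PySem.Int.ofStr? s2).getD 0|

-- ===== PORT B =====
-- while n>0: counts[n%10] += 1; n//=10   (the index n%10 is nonnegative here, so .toNat is exact)
def numDiffLoopB (n : Int) (counts : List Int) : List Int :=
  if _h : n > 0 then
    numDiffLoopB (PySem.Int.floordiv n 10)
      (counts.set (PySem.Int.mod n 10).toNat
        (PySem.List.pyGetD counts (PySem.Int.mod n 10) 0 + 1))
  else counts
termination_by n.toNat
decreasing_by
  rw [PySem.Int.floordiv_eq_ediv_of_pos (by norm_num : (0:Int) < 10)]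
  omega

-- str(d) * counts[d] is ported char-list-wise: PySem.List.pyRepeat on toChars (exact for str*int)
def num_diff_alt (n : Int) : Int :=
  let counts := numDiffLoopB n (PySem.List.pyRepeat [(0:Int)] 10)
  let asc := PySem.Str.join "" ((PySem.List.pyRange 0 10 1).map (fun d =>
      String.ofList (PySem.List.pyRepeat (PySem.Int.toChars d) (PySem.List.pyGetD counts d 0))))
  let desc := PySem.Str.join "" ((PySem.List.pyRange 9 (-1) (-1)).map (fun d =>
      String.ofList (PySem.List.pyRepeat (PySem.Int.toChars d) (PySem.List.pyGetD counts d 0))))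
  |(PySem.Int.ofStr? asc).getD 0 - (PySem.Int.ofStr? desc).getD 0|

-- ===== PRECONDITION & SPEC =====
-- Pre_ excludes exactly the non-positive inputs, where the Python A raises ValueError on int('') (B raises there too).
def Pre_num_diff (n : Int) : Prop := 0 < n
instance (n : Int) : Decidable (Pre_num_diff n) := by unfold Pre_num_diff; infer_instance
def pvWitness_num_diff : Int := 371

def Spec_num_diff (n : Int) (out : Int) : Prop := out = num_diff_alt n
instance (n : Int) (out : Int) : Decidable (Spec_num_diff n out) := by unfold Spec_num_diff; infer_instance

-- ===== CLAIM (what is proved, stated in full; the proofs are below) =====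
def Claim_equal_num_diff : Prop := ∀ (n : Int), Dom_num_diff n → Pre_num_diff n → Spec_num_diff n (num_diff n)

-- ===== LEMMAS AND PROOFS =====

def pvDigits (n : Int) : List Int := numDiffLoopA n []
theorem pvLoopA_acc (n : Int) (acc : List Int) : numDiffLoopA n acc = acc ++ pvDigits n := by
  by_cases h : n > 0
  · have e1 : numDiffLoopA n acc
        = numDiffLoopA (PySem.Int.floordiv n 10) (acc ++ [PySem.Int.mod n 10]) := by
      rw [numDiffLoopA]; simp [h]
    have e2 : pvDigits n = numDiffLoopA (PySem.Int.floordiv n 10) [PySem.Int.mod n 10] := by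
      rw [pvDigits, numDiffLoopA]; simp [h]
    rw [e1, e2, pvLoopA_acc (PySem.Int.floordiv n 10) (acc ++ [PySem.Int.mod n 10]),
        pvLoopA_acc (PySem.Int.floordiv n 10) [PySem.Int.mod n 10]]
    simp
  · have e2 : pvDigits n = [] := by rw [pvDigits, numDiffLoopA]; simp [h]
    rw [numDiffLoopA]; simp [h, e2]
termination_by n.toNat
decreasing_by all_goals (rw [PySem.Int.floordiv_eq_ediv_of_pos (by norm_num : (0:Int) < 10)]; omega)
theorem pvDigits_pos {n : Int} (h : n > 0) :
    pvDigits n = PySem.Int.mod n 10 :: pvDigits (PySem.Int.floordiv n 10) := by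
  rw [pvDigits, numDiffLoopA]
  simp only [h, dite_true]
  rw [pvLoopA_acc]
  simp
theorem pvDigits_nonpos {n : Int} (h : ¬ n > 0) : pvDigits n = [] := by
  rw [pvDigits, numDiffLoopA]; simp [h]
theorem pvDigits_bounds (n : Int) : ∀ d ∈ pvDigits n, 0 ≤ d ∧ d < 10 := by
  by_cases h : n > 0
  · rw [pvDigits_pos h]
    intro d hd
    rcases List.mem_cons.mp hd with rfl | hd
    · exact ⟨PySem.Int.mod_nonneg _ (by norm_num), PySem.Int.mod_lt _ (by norm_num)⟩
    · exact pvDigits_bounds (PySem.Int.floordiv n 10) d hd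
  · rw [pvDigits_nonpos h]; simp
termination_by n.toNat
decreasing_by rw [PySem.Int.floordiv_eq_ediv_of_pos (by norm_num : (0:Int) < 10)]; omega

theorem pvLoopB_len (n : Int) (c : List Int) : (numDiffLoopB n c).length = c.length := by
  by_cases h : n > 0
  · rw [numDiffLoopB]
    simp only [h, dite_true]
    rw [pvLoopB_len]
    simp
  · rw [numDiffLoopB]; simp [h]
termination_by n.toNat
decreasing_by rw [PySem.Int.floordiv_eq_ediv_of_pos (by norm_num : (0:Int) < 10)]; omega
theorem pvGetDSet (c : List Int) (r d : Nat) (hlt : r < c.length) (v : Int) :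
    (c.set r v).getD d 0 = if r = d then v else c.getD d 0 := by
  by_cases hq : r = d
  · subst hq; simp [List.getD, hlt]
  · simp [List.getD, hq]

theorem pvLoopB_count (n : Int) (c : List Int) (hc : c.length = 10) (d : Nat) (hd : d < 10) :
    (numDiffLoopB n c).getD d 0 = c.getD d 0 + ((pvDigits n).count (d : Int)) := by
  by_cases h : n > 0
  · have hr0 : (0:Int) ≤ PySem.Int.mod n 10 := PySem.Int.mod_nonneg _ (by norm_num)
    have hr1 : PySem.Int.mod n 10 < 10 := PySem.Int.mod_lt _ (by norm_num)
    have hlt : (PySem.Int.mod n 10).toNat < c.length := by omega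
    rw [numDiffLoopB]
    simp only [h, dite_true]
    rw [pvLoopB_count _ _ (by simp [hc]) d hd, pvDigits_pos h,
        PySem.List.pyGetD_of_nonneg _ _ hr0, List.count_cons,
        pvGetDSet c _ d hlt]
    have hm : PySem.Int.mod n 10 = n % 10 := PySem.Int.mod_eq_emod_of_pos (by norm_num)
    have hbeq : (((n % 10 : Int)) == (d:Int)) = decide (((n % 10 : Int)).toNat = d) := by
      by_cases hq : ((n % 10 : Int)).toNat = d
      · have he : (n % 10 : Int) = (d:Int) := by omega
        simp [he]
      · have he : (n % 10 : Int) ≠ (d:Int) := by omega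
        simp [he, hq]
    simp only [hm]
    rw [hbeq]
    simp only [decide_eq_true_eq]
    split_ifs with hq
    · simp only [hq]; push_cast; omega
    · push_cast; omega
  · rw [numDiffLoopB, pvDigits_nonpos h]; simp [h]
termination_by n.toNat
decreasing_by rw [PySem.Int.floordiv_eq_ediv_of_pos (by norm_num : (0:Int) < 10)]; omega

def pvAsc (n : Int) : List Int :=
  ([0,1,2,3,4,5,6,7,8,9] : List Int).flatMap (fun d => List.replicate ((pvDigits n).count d) d)
def pvDesc (n : Int) : List Int :=
  ([9,8,7,6,5,4,3,2,1,0] : List Int).flatMap (fun d => List.replicate ((pvDigits n).count d) d)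

theorem pvCountAsc (n : Int) (a : Int) : (pvAsc n).count a = (pvDigits n).count a := by
  rw [pvAsc]
  simp only [List.flatMap_cons, List.flatMap_nil, List.count_append, List.count_replicate,
    List.count_nil, beq_iff_eq]
  by_cases hb : 0 ≤ a ∧ a < 10
  · obtain ⟨h0, h1⟩ := hb
    interval_cases a <;> norm_num
  · have hmem : a ∉ pvDigits n := fun hm => by have := pvDigits_bounds n a hm; omega
    rw [List.count_eq_zero_of_not_mem hmem]
    rw [if_neg (by omega), if_neg (by omega), if_neg (by omega), if_neg (by omega),
        if_neg (by omega), if_neg (by omega), if_neg (by omega), if_neg (by omega),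
        if_neg (by omega), if_neg (by omega)]

theorem pvCountDesc (n : Int) (a : Int) : (pvDesc n).count a = (pvDigits n).count a := by
  rw [pvDesc]
  simp only [List.flatMap_cons, List.flatMap_nil, List.count_append, List.count_replicate,
    List.count_nil, beq_iff_eq]
  by_cases hb : 0 ≤ a ∧ a < 10
  · obtain ⟨h0, h1⟩ := hb
    interval_cases a <;> norm_num
  · have hmem : a ∉ pvDigits n := fun hm => by have := pvDigits_bounds n a hm; omega
    rw [List.count_eq_zero_of_not_mem hmem]
    rw [if_neg (by omega), if_neg (by omega), if_neg (by omega), if_neg (by omega),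
        if_neg (by omega), if_neg (by omega), if_neg (by omega), if_neg (by omega),
        if_neg (by omega), if_neg (by omega)]

theorem pvPermAsc (n : Int) : (pvAsc n).Perm (pvDigits n) := by
  rw [List.perm_iff_count]; intro a; exact pvCountAsc n a
theorem pvPermDesc (n : Int) : (pvDesc n).Perm (pvDigits n) := by
  rw [List.perm_iff_count]; intro a; exact pvCountDesc n a

theorem pvFlatMapRepPairwise (R : Int → Int → Prop) (c : Int → Nat) (L : List Int)
    (hL : List.Pairwise R L) (hrefl : ∀ a ∈ L, R a a) :
    List.Pairwise R (L.flatMap (fun d => List.replicate (c d) d)) := by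
  induction L with
  | nil => simp
  | cons d t ih =>
    rw [List.flatMap_cons, List.pairwise_append]
    refine ⟨?_, ih hL.of_cons (fun a ha => hrefl a (List.mem_cons_of_mem _ ha)), ?_⟩
    · exact List.pairwise_replicate.mpr (Or.inr (hrefl d List.mem_cons_self))
    · intro a ha b hb
      rw [List.eq_of_mem_replicate ha]
      obtain ⟨e, he, hbe⟩ := List.mem_flatMap.mp hb
      rw [List.eq_of_mem_replicate hbe]
      exact (List.pairwise_cons.mp hL).1 e he

theorem pvSortedAsc (n : Int) :
    PySem.List.sorted (pvDigits n) (fun i => i) false = pvAsc n :=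
  PySem.List.sorted_id_eq_of_perm_of_pairwise _ _ (pvPermAsc n)
    (pvFlatMapRepPairwise _ _ _ (by decide) (fun a _ => le_refl a))

theorem pvSortedDesc (n : Int) :
    PySem.List.sorted (pvDigits n) (fun i => i) true = pvDesc n := by
  apply PySem.List.eq_of_perm_of_pairwise_le_of_injective (fun x : Int => -x) neg_injective
  · exact (PySem.List.sorted_perm _ _ _).trans (pvPermDesc n).symm
  · exact (PySem.List.sorted_pairwise_rev _ _).imp (fun h => by omega)
  · exact (pvFlatMapRepPairwise (fun a b => -a ≤ -b) _ _ (by decide)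
      (fun a _ => le_refl _))

theorem pvJoinNil (parts : List (List Char)) : PySem.Chars.join [] parts = parts.flatten := by
  show [].intercalate parts = parts.flatten
  simp [List.intercalate]
  induction parts with
  | nil => simp
  | cons h t ih => cases t <;> simp_all [List.intersperse]

theorem pvFlattenRepSingleton (k : Nat) (a : Char) :
    (List.replicate k ([a] : List Char)).flatten = List.replicate k a := by
  induction k with
  | zero => simp
  | succ m ih => simp [List.replicate_succ, ih]

theorem pvGetCnt (n : Int) (j : Int) (h0 : 0 ≤ j) (h1 : j < 10) :
    PySem.List.pyGetD (numDiffLoopB n (PySem.List.pyRepeat [(0:Int)] 10)) j 0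
      = ((pvDigits n).count j : Int) := by
  rw [PySem.List.pyGetD_of_nonneg _ _ h0,
      pvLoopB_count n _ (by rfl) j.toNat (by omega)]
  have hj : ((j.toNat : Nat) : Int) = j := by omega
  rw [hj]
  have hz : (PySem.List.pyRepeat [(0:Int)] 10).getD j.toNat 0 = 0 := by
    have : j.toNat < 10 := by omega
    interval_cases j <;> rfl
  rw [hz, zero_add]

theorem pvStr1 (n : Int) :
    PySem.Str.join "" ((PySem.List.sorted (pvDigits n) (fun i => i) false).map
        (fun i => PySem.Int.toStr i))
      = PySem.Str.join "" ((PySem.List.pyRange 0 10 1).map (fun d =>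
          String.ofList (PySem.List.pyRepeat (PySem.Int.toChars d)
            (PySem.List.pyGetD (numDiffLoopB n (PySem.List.pyRepeat [(0:Int)] 10)) d 0)))) := by
  apply String.toList_inj.mp
  rw [PySem.Str.toList_join, PySem.Str.toList_join]
  have he : ("" : String).toList = ([] : List Char) := rfl
  rw [he, pvJoinNil, pvJoinNil, pvSortedAsc, pvAsc]
  have hrange : PySem.List.pyRange 0 10 1 = [0,1,2,3,4,5,6,7,8,9] := by decide
  rw [hrange]
  simp only [List.map_cons, List.map_nil, List.flatMap_cons, List.flatMap_nil,
    List.map_append, List.map_replicate, List.flatten_cons, List.flatten_nil,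
    List.append_nil, String.toList_ofList, List.flatten_append]
  rw [pvGetCnt n 0 (by norm_num) (by norm_num), pvGetCnt n 1 (by norm_num) (by norm_num),
      pvGetCnt n 2 (by norm_num) (by norm_num), pvGetCnt n 3 (by norm_num) (by norm_num),
      pvGetCnt n 4 (by norm_num) (by norm_num), pvGetCnt n 5 (by norm_num) (by norm_num),
      pvGetCnt n 6 (by norm_num) (by norm_num), pvGetCnt n 7 (by norm_num) (by norm_num),
      pvGetCnt n 8 (by norm_num) (by norm_num), pvGetCnt n 9 (by norm_num) (by norm_num)]
  simp only [show PySem.Int.toChars 0 = ['0'] from rfl, show PySem.Int.toChars 1 = ['1'] from rfl,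
    show PySem.Int.toChars 2 = ['2'] from rfl, show PySem.Int.toChars 3 = ['3'] from rfl,
    show PySem.Int.toChars 4 = ['4'] from rfl, show PySem.Int.toChars 5 = ['5'] from rfl,
    show PySem.Int.toChars 6 = ['6'] from rfl, show PySem.Int.toChars 7 = ['7'] from rfl,
    show PySem.Int.toChars 8 = ['8'] from rfl, show PySem.Int.toChars 9 = ['9'] from rfl,
    show (PySem.Int.toStr 0).toList = ['0'] from rfl, show (PySem.Int.toStr 1).toList = ['1'] from rfl,
    show (PySem.Int.toStr 2).toList = ['2'] from rfl, show (PySem.Int.toStr 3).toList = ['3'] from rfl,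
    show (PySem.Int.toStr 4).toList = ['4'] from rfl, show (PySem.Int.toStr 5).toList = ['5'] from rfl,
    show (PySem.Int.toStr 6).toList = ['6'] from rfl, show (PySem.Int.toStr 7).toList = ['7'] from rfl,
    show (PySem.Int.toStr 8).toList = ['8'] from rfl, show (PySem.Int.toStr 9).toList = ['9'] from rfl,
    PySem.List.pyRepeat_singleton, Int.toNat_natCast, pvFlattenRepSingleton]

theorem pvStr2 (n : Int) :
    PySem.Str.join "" ((PySem.List.sorted (pvDigits n) (fun i => i) true).map
        (fun i => PySem.Int.toStr i))
      = PySem.Str.join "" ((PySem.List.pyRange 9 (-1) (-1)).map (fun d =>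
          String.ofList (PySem.List.pyRepeat (PySem.Int.toChars d)
            (PySem.List.pyGetD (numDiffLoopB n (PySem.List.pyRepeat [(0:Int)] 10)) d 0)))) := by
  apply String.toList_inj.mp
  rw [PySem.Str.toList_join, PySem.Str.toList_join]
  have he : ("" : String).toList = ([] : List Char) := rfl
  rw [he, pvJoinNil, pvJoinNil, pvSortedDesc, pvDesc]
  have hrange : PySem.List.pyRange 9 (-1) (-1) = [9,8,7,6,5,4,3,2,1,0] := by decide
  rw [hrange]
  simp only [List.map_cons, List.map_nil, List.flatMap_cons, List.flatMap_nil,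
    List.map_append, List.map_replicate, List.flatten_cons, List.flatten_nil,
    List.append_nil, String.toList_ofList, List.flatten_append]
  rw [pvGetCnt n 9 (by norm_num) (by norm_num), pvGetCnt n 8 (by norm_num) (by norm_num),
      pvGetCnt n 7 (by norm_num) (by norm_num), pvGetCnt n 6 (by norm_num) (by norm_num),
      pvGetCnt n 5 (by norm_num) (by norm_num), pvGetCnt n 4 (by norm_num) (by norm_num),
      pvGetCnt n 3 (by norm_num) (by norm_num), pvGetCnt n 2 (by norm_num) (by norm_num),
      pvGetCnt n 1 (by norm_num) (by norm_num), pvGetCnt n 0 (by norm_num) (by norm_num)]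
  simp only [show PySem.Int.toChars 0 = ['0'] from rfl, show PySem.Int.toChars 1 = ['1'] from rfl,
    show PySem.Int.toChars 2 = ['2'] from rfl, show PySem.Int.toChars 3 = ['3'] from rfl,
    show PySem.Int.toChars 4 = ['4'] from rfl, show PySem.Int.toChars 5 = ['5'] from rfl,
    show PySem.Int.toChars 6 = ['6'] from rfl, show PySem.Int.toChars 7 = ['7'] from rfl,
    show PySem.Int.toChars 8 = ['8'] from rfl, show PySem.Int.toChars 9 = ['9'] from rfl,
    show (PySem.Int.toStr 0).toList = ['0'] from rfl, show (PySem.Int.toStr 1).toList = ['1'] from rfl,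
    show (PySem.Int.toStr 2).toList = ['2'] from rfl, show (PySem.Int.toStr 3).toList = ['3'] from rfl,
    show (PySem.Int.toStr 4).toList = ['4'] from rfl, show (PySem.Int.toStr 5).toList = ['5'] from rfl,
    show (PySem.Int.toStr 6).toList = ['6'] from rfl, show (PySem.Int.toStr 7).toList = ['7'] from rfl,
    show (PySem.Int.toStr 8).toList = ['8'] from rfl, show (PySem.Int.toStr 9).toList = ['9'] from rfl,
    PySem.List.pyRepeat_singleton, Int.toNat_natCast, pvFlattenRepSingleton]

theorem pvMain (n : Int) : num_diff n = num_diff_alt n := by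
  simp only [num_diff, num_diff_alt]
  rw [show numDiffLoopA n [] = pvDigits n from rfl, pvStr1 n, pvStr2 n]

-- ===== VERDICT (by name: the statement is the Claim_ definition above) =====
theorem num_diff_spec : Claim_equal_num_diff := by
  intro n _ _
  unfold Spec_num_diff
  exact pvMain n
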